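-- pv_equiv track=rewrite | github.com/OARNAUCNLAEY/AOC | J.py | make_bitmask_machine
-- ===== SOURCE A (Python) =====
-- def make_bitmask_machine(tok):
--     val = 0
--     ind = 0
--     for i in tok[1:-1]:
--         if i == "#":
--             val += 2**ind
--         ind += 1
--     return val
-- ===== SOURCE B (Python) =====
-- def make_bitmask_machine(tok):
--     s = tok[1:-1]
--     if not s:
--         return 0
--     bits = "".join("1" if c == "#" else "0" for c in reversed(s))
--     return int(bits, 2)
-- ===== Notes on version B (the rewrite author's own statement) =====
-- stated objective: idiomatic
-- what changed: Replaces the manual positional power-of-two accumulation loop with building a reversed binary-digit string and parsing it in base two, guarding the empty inner string.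
import Mathlib
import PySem

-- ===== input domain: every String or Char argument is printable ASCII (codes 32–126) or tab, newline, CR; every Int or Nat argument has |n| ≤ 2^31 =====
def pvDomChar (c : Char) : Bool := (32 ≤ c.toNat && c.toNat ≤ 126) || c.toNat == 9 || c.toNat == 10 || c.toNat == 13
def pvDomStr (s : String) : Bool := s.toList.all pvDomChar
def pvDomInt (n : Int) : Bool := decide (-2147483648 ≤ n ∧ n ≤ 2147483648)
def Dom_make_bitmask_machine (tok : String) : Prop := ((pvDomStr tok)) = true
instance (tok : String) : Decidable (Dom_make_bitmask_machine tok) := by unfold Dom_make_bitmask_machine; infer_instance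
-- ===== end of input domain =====

-- B builds a reversed '0'/'1' string and parses it base 2 instead of A's 2**ind accumulation; objective: idiomatic.

-- ===== PORT A =====
-- the for-loop over tok[1:-1] with state (val, ind); ind is the nonnegative loop counter
def pvGoA : List Char → Int → Nat → Int
  | [], val, _ => val
  | c :: cs, val, ind => pvGoA cs (if c = '#' then val + 2 ^ ind else val) (ind + 1)

def make_bitmask_machine (tok : String) : Int :=
  pvGoA (PySem.List.slice tok.toList (some 1) (some (-1))) 0 0

-- ===== PORT B =====
-- int(bits, 2) hand-ported: MSB-first accumulation acc*2 + digit; exact here since bits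
-- consists only of '0'/'1' and is nonempty when called
def pvParseBin : List Char → Int → Int
  | [], acc => acc
  | c :: cs, acc => pvParseBin cs (acc * 2 + (if c = '1' then 1 else 0))

def make_bitmask_machine_alt (tok : String) : Int :=
  let s := PySem.List.slice tok.toList (some 1) (some (-1))
  if s = [] then 0
  else pvParseBin (s.reverse.map (fun c => if c = '#' then '1' else '0')) 0

-- ===== PRECONDITION & SPEC =====
def Spec_make_bitmask_machine (tok : String) (out : Int) : Prop := out = make_bitmask_machine_alt tok
instance (tok : String) (out : Int) : Decidable (Spec_make_bitmask_machine tok out) := by unfold Spec_make_bitmask_machine; infer_instance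

-- ===== CLAIM (what is proved, stated in full; the proofs are below) =====
def Claim_equal_make_bitmask_machine : Prop := ∀ (tok : String), Dom_make_bitmask_machine tok → Spec_make_bitmask_machine tok (make_bitmask_machine tok)

-- ===== LEMMAS AND PROOFS =====

-- LSB-first value of a mask list
def pvVal : List Char → Int
  | [] => 0
  | c :: cs => (if c = '#' then 1 else 0) + 2 * pvVal cs

theorem pvGoA_eq (l : List Char) : ∀ (val : Int) (ind : Nat),
    pvGoA l val ind = val + 2 ^ ind * pvVal l := by
  induction l with
  | nil => intro val ind; simp [pvGoA, pvVal]
  | cons c cs ih =>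
    intro val ind
    simp only [pvGoA, pvVal, ih, pow_succ]
    split_ifs <;> ring

theorem pvParseBin_append (l : List Char) : ∀ (c : Char) (acc : Int),
    pvParseBin (l ++ [c]) acc = pvParseBin l acc * 2 + (if c = '1' then 1 else 0) := by
  induction l with
  | nil => intro c acc; simp [pvParseBin]
  | cons d ds ih => intro c acc; simp [pvParseBin, ih]

theorem pvParseBin_rev (l : List Char) :
    pvParseBin (l.reverse.map (fun c => if c = '#' then '1' else '0')) 0 = pvVal l := by
  induction l with
  | nil => simp [pvParseBin, pvVal]
  | cons c cs ih =>
    simp only [List.reverse_cons, List.map_append, List.map, pvParseBin_append, ih, pvVal]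
    split_ifs with h1 h2
    · ring
    · simp at h2
    · simp_all
    · ring

-- ===== VERDICT (by name: the statement is the Claim_ definition above) =====
theorem make_bitmask_machine_spec : Claim_equal_make_bitmask_machine := by
  intro tok _
  unfold Spec_make_bitmask_machine make_bitmask_machine make_bitmask_machine_alt
  set s := PySem.List.slice tok.toList (some 1) (some (-1)) with hs
  by_cases h : s = []
  · simp [h, pvGoA]
  · rw [if_neg h, pvGoA_eq, pvParseBin_rev]
    ring
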